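-- pv_equiv track=rewrite | github.com/RealSycoBak/Cryptography | Alons-CYPHER-WORK/main.py | rolling_add_mod
-- ===== SOURCE A (Python) =====
-- def rolling_add_mod(encoded_message, keys, n):
--   which_key = 0
--   assert len(keys) > 0
--   result = []
--   for i in encoded_message:
--     # this is the key we use at this step
--     key = keys[which_key]
--     # we update the key we are going to use one position to the right wrpaing around to the front
--     which_key = (which_key + 1) % len(keys)
--     result += [(i + key ) % n]
--   return result
--
-- key = 15
--
-- keys = []
-- ===== SOURCE B (Python) =====
-- def rolling_add_mod(encoded_message, keys, n):
--     assert len(keys) > 0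
--     k = len(keys)
--     result = []
--     for start in range(0, len(encoded_message), k):
--         block = encoded_message[start:start + k]
--         result += [(x + key) % n for x, key in zip(block, keys)]
--     return result
-- ===== Notes on version B (the rewrite author's own statement) =====
-- stated objective: alternative
-- what changed: Instead of threading a rotating key index element by element, B slices the message into blocks of len(keys) and zips each whole block with the key list, so no modular key index exists at all.
import Mathlib
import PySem

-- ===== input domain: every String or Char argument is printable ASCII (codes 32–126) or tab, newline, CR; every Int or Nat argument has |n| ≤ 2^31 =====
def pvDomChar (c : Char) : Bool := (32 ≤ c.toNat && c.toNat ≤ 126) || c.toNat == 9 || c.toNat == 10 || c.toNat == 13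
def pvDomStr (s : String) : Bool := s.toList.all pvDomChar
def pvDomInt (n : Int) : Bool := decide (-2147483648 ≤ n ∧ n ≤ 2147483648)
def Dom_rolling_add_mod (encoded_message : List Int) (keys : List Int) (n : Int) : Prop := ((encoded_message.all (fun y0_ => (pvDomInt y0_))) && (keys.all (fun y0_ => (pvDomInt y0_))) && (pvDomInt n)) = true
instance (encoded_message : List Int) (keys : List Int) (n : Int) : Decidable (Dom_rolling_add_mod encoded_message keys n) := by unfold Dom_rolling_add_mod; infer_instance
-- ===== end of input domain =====

-- B replaces A's element-wise rotating key index with block processing: the message is cut into chunks of len(keys) and each chunk is zipped with the key list; objective: alternative decomposition.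


-- ===== PORT A =====
-- A's for-loop over encoded_message threading (which_key, result); keys[which_key] is
-- PySem.List.pyGetD (the index is always in range under Pre_, so the default is never read).
def rollingGoA (keys : List Int) (n : Int) : List Int → Int → List Int → List Int
  | [], _, result => result
  | i :: rest, which_key, result =>
    let key := PySem.List.pyGetD keys which_key 0
    rollingGoA keys n rest (PySem.Int.mod (which_key + 1) (PySem.List.len keys))
      (result ++ [PySem.Int.mod (i + key) n])

def rolling_add_mod (encoded_message : List Int) (keys : List Int) (n : Int) : List Int :=
  rollingGoA keys n encoded_message 0 []

-- ===== PORT B =====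
-- B's chunk loop `for start in range(0, len(em), k)` as structural recursion peeling one
-- block of k = keys.length elements per step (slice em[start:start+k] = take/drop); the
-- keys = [] guard only makes the recursion total (Pre_ excludes it).
def rollingGoB (keys : List Int) (n : Int) (em : List Int) : List Int :=
  if em = [] ∨ keys = [] then []
  else
    List.zipWith (fun x key => PySem.Int.mod (x + key) n) (em.take keys.length) keys
      ++ rollingGoB keys n (em.drop keys.length)
termination_by em.length
decreasing_by
  rename_i h
  push_neg at h
  simp only [List.length_drop]
  have h1 : em.length ≠ 0 := fun hc => h.1 (List.eq_nil_of_length_eq_zero hc)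
  have h2 : keys.length ≠ 0 := fun hc => h.2 (List.eq_nil_of_length_eq_zero hc)
  omega

def rolling_add_mod_alt (encoded_message : List Int) (keys : List Int) (n : Int) : List Int :=
  rollingGoB keys n encoded_message

-- ===== PRECONDITION & SPEC =====
-- Pre_ excludes exactly where A raises: empty keys (AssertionError) and n = 0 with a
-- nonempty message (ZeroDivisionError in `% n`).
def Pre_rolling_add_mod (encoded_message : List Int) (keys : List Int) (n : Int) : Prop :=
  keys ≠ [] ∧ (encoded_message = [] ∨ n ≠ 0)
instance (encoded_message : List Int) (keys : List Int) (n : Int) : Decidable (Pre_rolling_add_mod encoded_message keys n) := by unfold Pre_rolling_add_mod; infer_instance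

def pvWitness_rolling_add_mod : List Int × List Int × Int := ([7, 2, -3], [1, 5], 26)

def Spec_rolling_add_mod (encoded_message : List Int) (keys : List Int) (n : Int) (out : List Int) : Prop := out = rolling_add_mod_alt encoded_message keys n
instance (encoded_message : List Int) (keys : List Int) (n : Int) (out : List Int) : Decidable (Spec_rolling_add_mod encoded_message keys n out) := by unfold Spec_rolling_add_mod; infer_instance

-- ===== CLAIM (what is proved, stated in full; the proofs are below) =====
def Claim_equal_rolling_add_mod : Prop := ∀ (encoded_message : List Int) (keys : List Int) (n : Int), Dom_rolling_add_mod encoded_message keys n → Pre_rolling_add_mod encoded_message keys n → Spec_rolling_add_mod encoded_message keys n (rolling_add_mod encoded_message keys n)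

-- ===== LEMMAS AND PROOFS =====

-- A's loop over one block aligned at key index wk: it emits the block zipped with the
-- key suffix from wk and continues with key index (wk + blocklen) % k.
lemma rollingGoA_block (keys : List Int) (n : Int) (hk : keys ≠ []) :
    ∀ (xs rest : List Int) (wk : ℕ), wk < keys.length → wk + xs.length ≤ keys.length →
      rollingGoA keys n (xs ++ rest) (wk : Int) [] =
        List.zipWith (fun x key => PySem.Int.mod (x + key) n) xs (keys.drop wk)
          ++ rollingGoA keys n rest (PySem.Int.mod ((wk : Int) + xs.length) (PySem.List.len keys)) []
  | [], rest, wk, hlt, _ => by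
    have hkpos : (0:Int) < PySem.List.len keys := by
      simp only [PySem.List.len_eq]
      exact_mod_cast List.length_pos_iff.mpr hk
    rw [PySem.Int.mod_eq_emod_of_pos hkpos]
    simp only [PySem.List.len_eq, List.length_nil, Int.natCast_zero, add_zero]
    rw [Int.emod_eq_of_lt (by positivity) (by exact_mod_cast hlt)]
    simp
  | x :: xs', rest, wk, hlt, hle => by
    have hkposN : 0 < keys.length := List.length_pos_iff.mpr hk
    have hkpos : (0:Int) < PySem.List.len keys := by
      simp only [PySem.List.len_eq]
      exact_mod_cast hkposN
    have hdrop : keys.drop wk = keys[wk] :: keys.drop (wk + 1) :=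
      (List.drop_eq_getElem_cons hlt)
    have hacc : ∀ (em : List Int) (w : Int) (res : List Int),
        rollingGoA keys n em w res = res ++ rollingGoA keys n em w [] := by
      intro em
      induction em with
      | nil => intro w res; simp [rollingGoA]
      | cons a t ih =>
        intro w res
        simp only [rollingGoA]
        rw [ih _ (res ++ _), ih _ ([] ++ _)]
        simp
    simp only [List.cons_append, rollingGoA]
    rw [hacc, hdrop]
    have hget : PySem.List.pyGetD keys (wk : Int) 0 = keys[wk] := by
      rw [PySem.List.pyGetD_natCast]
      exact List.getD_eq_getElem _ _ hlt
    rcases Nat.lt_or_ge (wk + 1) keys.length with hcase | hcase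
    · -- no wraparound: next key index is wk + 1
      have hmod1 : PySem.Int.mod ((wk : Int) + 1) (PySem.List.len keys) = ((wk + 1 : ℕ) : Int) := by
        rw [PySem.Int.mod_eq_emod_of_pos hkpos]
        simp only [PySem.List.len_eq]
        push_cast
        rw [Int.emod_eq_of_lt (by positivity) (by exact_mod_cast hcase)]
      rw [hmod1, rollingGoA_block keys n hk xs' rest (wk + 1) hcase (by simp at hle ⊢; omega)]
      simp only [List.zipWith_cons_cons, hget, List.cons_append, List.nil_append]
      congr 2
      have harg : (1 + (wk : Int) + (xs'.length : Int)) = ((wk : Int) + (((x :: xs').length : ℕ) : Int)) := by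
        simp only [List.length_cons]; push_cast; ring
      rw [← harg]
      push_cast
      ring_nf
    · -- wraparound: wk + 1 = keys.length, so xs' must be empty
      have hwk1 : wk + 1 = keys.length := by omega
      have hxs' : xs' = [] := by
        have : xs'.length = 0 := by simp at hle; omega
        exact List.eq_nil_of_length_eq_zero this
      subst hxs'
      have hklen : ((wk : Int) + 1) = (keys.length : Int) := by exact_mod_cast hwk1
      have hmod1 : PySem.Int.mod ((wk : Int) + 1) (PySem.List.len keys) = 0 := by
        rw [PySem.Int.mod_eq_emod_of_pos hkpos]
        simp only [PySem.List.len_eq]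
        rw [hklen, Int.emod_self]
      have hmod2 : PySem.Int.mod ((wk : Int) + (((x :: ([] : List Int)).length : ℕ) : Int))
          (PySem.List.len keys) = 0 := by
        rw [PySem.Int.mod_eq_emod_of_pos hkpos]
        simp only [PySem.List.len_eq, List.length_cons, List.length_nil]
        have h : ((wk : Int) + ((0 + 1 : ℕ) : Int)) = (keys.length : Int) := by exact_mod_cast hwk1
        rw [h, Int.emod_self]
      rw [hmod1, hmod2]
      simp only [List.nil_append, hget, List.zipWith_cons_cons, List.zipWith_nil_left,
        List.cons_append]

-- Main bridge: A's loop from key index 0 equals B's chunk recursion.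
lemma rollingGoA_eq_goB (keys : List Int) (n : Int) (hk : keys ≠ []) :
    ∀ (em : List Int), rollingGoA keys n em 0 [] = rollingGoB keys n em := by
  intro em
  induction hlen : em.length using Nat.strong_induction_on generalizing em with
  | _ N ih =>
    rcases eq_or_ne em [] with rfl | hem
    · rw [rollingGoB]; simp [rollingGoA]
    · rw [rollingGoB]
      simp only [hem, hk, or_self, if_false]
      have hkposN : 0 < keys.length := List.length_pos_iff.mpr hk
      have h0 : ((0 : ℕ) : Int) = (0 : Int) := rfl
      conv_lhs => rw [show em = em.take keys.length ++ em.drop keys.length by simp, ← h0]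
      rw [rollingGoA_block keys n hk (em.take keys.length) (em.drop keys.length) 0 hkposN
            (by simp)]
      simp only [List.drop_zero, Nat.cast_zero, zero_add]
      congr 1
      rcases Nat.lt_or_ge em.length keys.length with hc | hc
      · -- short final block: the drop is empty, both recursions stop
        have hnil : em.drop keys.length = [] := List.drop_eq_nil_of_le (by omega)
        rw [hnil, rollingGoB]
        simp [rollingGoA]
      · -- full block: the next key index is k % k = 0, recurse on the rest
        have htake : (em.take keys.length).length = keys.length := by simp; omega
        have hmod : PySem.Int.mod (((em.take keys.length).length : ℕ) : Int)
            (PySem.List.len keys) = 0 := by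
          rw [PySem.Int.mod_eq_emod_of_pos (by simp only [PySem.List.len_eq]; exact_mod_cast hkposN)]
          simp only [PySem.List.len_eq, htake]
          simp
        rw [hmod]
        subst hlen
        exact ih (em.drop keys.length).length (by simp; omega) _ rfl

-- ===== VERDICT (by name: the statement is the Claim_ definition above) =====
theorem rolling_add_mod_spec : Claim_equal_rolling_add_mod := by
  intro em keys n _ hpre
  unfold Spec_rolling_add_mod rolling_add_mod rolling_add_mod_alt
  exact rollingGoA_eq_goB keys n hpre.1 em
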